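-- pv_equiv track=rewrite | github.com/gaspersavle/zapiski-faks-2024-2025 | lab/informacija_in_kodi/vaja_3/vaja3_predloga.py | izracunaj_velikost
-- ===== SOURCE A (Python) =====
-- def izracunaj_velikost(KT):
--     import math
--     dict_size = 256
--     num_bits = 8
--     total_bits = 0
--     for code in KT:
--         total_bits += num_bits
--         if dict_size == (2**num_bits):
--             num_bits += 1
--
--         dict_size += 1
--
--     total_size = math.ceil(total_bits / 8)
--     return total_size
-- ===== SOURCE B (Python) =====
-- def izracunaj_velikost(KT):
--     n = len(KT)
--     if n == 0:
--         return 0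
--     W = (254 + n).bit_length()
--     total = 0
--     for w in range(8, W + 1):
--         s = max(0, 2 ** (w - 1) - 255)
--         e = min(n, 2 ** w - 255)
--         total += w * (e - s)
--     return (total + 7) // 8
-- ===== Notes on version B (the rewrite author's own statement) =====
-- stated objective: faster
-- what changed: Replaces A's per-code loop (which grows the dictionary and widens the code size one element at a time) by a direct sum over the O(log n) power-of-two width blocks, computed from len(KT) alone.
import Mathlib
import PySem

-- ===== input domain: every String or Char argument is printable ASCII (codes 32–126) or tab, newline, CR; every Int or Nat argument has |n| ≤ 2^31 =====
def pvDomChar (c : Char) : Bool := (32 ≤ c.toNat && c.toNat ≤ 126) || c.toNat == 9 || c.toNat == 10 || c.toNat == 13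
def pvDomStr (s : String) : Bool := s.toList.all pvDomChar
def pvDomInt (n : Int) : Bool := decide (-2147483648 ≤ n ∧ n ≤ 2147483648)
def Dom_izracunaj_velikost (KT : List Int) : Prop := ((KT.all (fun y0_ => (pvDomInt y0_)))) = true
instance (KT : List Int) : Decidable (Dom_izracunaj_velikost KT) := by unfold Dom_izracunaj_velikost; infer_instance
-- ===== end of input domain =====

-- B replaces A's per-code loop by a sum over the power-of-two width blocks computed from len(KT) alone.

-- ===== PORT A =====
-- one iteration of A's 'for code in KT' body, state = (dict_size, num_bits, total_bits)
def stepA (st : Int × Int × Int) : Int × Int × Int :=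
  let dict_size := st.1
  let num_bits := st.2.1
  let total_bits := st.2.2 + num_bits
  let num_bits' := if dict_size = 2 ^ num_bits.toNat then num_bits + 1 else num_bits
  (dict_size + 1, num_bits', total_bits)

def izracunaj_velikost (KT : List Int) : Int :=
  let st := KT.foldl (fun st _ => stepA st) ((256 : Int), (8 : Int), (0 : Int))
  -- math.ceil(total_bits / 8): ported as the exact integer ceiling (the float division is exact here)
  Neg.neg (PySem.Int.floordiv (Neg.neg st.2.2) 8)

-- ===== PORT B =====
-- int.bit_length, exact for nonnegative arguments
def pyBitLength (m : Nat) : Nat := if m = 0 then 0 else Nat.log2 m + 1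

def izracunaj_velikost_alt (KT : List Int) : Int :=
  let n : Int := KT.length
  if n = 0 then 0
  else
    let W : Int := (pyBitLength (254 + n).toNat : Int)
    let total := (PySem.List.pyRange 8 (W + 1) 1).foldl
      (fun t w => t + w * (min n (2 ^ w.toNat - 255) - max 0 (2 ^ (w.toNat - 1) - 255))) 0
    PySem.Int.floordiv (total + 7) 8

-- ===== PRECONDITION & SPEC =====
def Spec_izracunaj_velikost (KT : List Int) (out : Int) : Prop := out = izracunaj_velikost_alt KT
instance (KT : List Int) (out : Int) : Decidable (Spec_izracunaj_velikost KT out) := by unfold Spec_izracunaj_velikost; infer_instance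

-- ===== CLAIM (what is proved, stated in full; the proofs are below) =====
def Claim_equal_izracunaj_velikost : Prop := ∀ (KT : List Int), Dom_izracunaj_velikost KT → Spec_izracunaj_velikost KT (izracunaj_velikost KT)

-- ===== LEMMAS AND PROOFS =====

-- width (in bits) that A uses for the (j+1)-st code
def nbN (j : Nat) : Nat := Nat.log2 (255 + j) + 1

-- the per-width summand of B
def fnB (ν : Nat) (w : Int) : Int :=
  w * (min (ν : Int) (2 ^ w.toNat - 255) - max 0 (2 ^ (w.toNat - 1) - 255))

lemma log2_succ (m : Nat) (hm : 1 ≤ m) :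
    Nat.log2 (m + 1) = if m + 1 = 2 ^ (Nat.log2 m + 1) then Nat.log2 m + 1 else Nat.log2 m := by
  have h1 : 2 ^ Nat.log2 m ≤ m := Nat.log2_self_le (by omega)
  have h2 : m < 2 ^ (Nat.log2 m + 1) := Nat.lt_log2_self
  split_ifs with h
  · have hb : Nat.log2 m + 1 ≤ Nat.log2 (m + 1) :=
      (Nat.le_log2 (by omega)).2 (by rw [h])
    have ha : Nat.log2 (m + 1) < Nat.log2 m + 2 :=
      (Nat.log2_lt (by omega)).2 (by
        rw [h]
        exact Nat.pow_lt_pow_right (by norm_num) (by omega))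
    omega
  · have hlt : m + 1 < 2 ^ (Nat.log2 m + 1) := by omega
    have ha : Nat.log2 (m + 1) < Nat.log2 m + 1 := (Nat.log2_lt (by omega)).2 hlt
    have hb : Nat.log2 m ≤ Nat.log2 (m + 1) := (Nat.le_log2 (by omega)).2 (by omega)
    omega

lemma nbN_succ (j : Nat) :
    nbN (j + 1) = if 256 + j = 2 ^ (nbN j) then nbN j + 1 else nbN j := by
  unfold nbN
  have e : 255 + (j + 1) = (255 + j) + 1 := by omega
  rw [e, log2_succ (255 + j) (by omega)]
  have e2 : (255 + j) + 1 = 256 + j := by omega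
  rw [e2]
  split_ifs <;> omega

lemma stepA_eq (j : Nat) (t : Int) :
    stepA (256 + (j : Int), ((nbN j : Nat) : Int), t)
      = (256 + ((j + 1 : Nat) : Int), ((nbN (j + 1) : Nat) : Int), t + (nbN j : Int)) := by
  have ht : ((nbN j : Int)).toNat = nbN j := Int.toNat_natCast _
  have hcond : ((256 + (j : Int)) = (2 : Int) ^ nbN j) ↔ (256 + j = 2 ^ nbN j) := by
    constructor <;> intro h <;> exact_mod_cast h
  unfold stepA
  simp only [ht]
  by_cases hc : 256 + j = 2 ^ nbN j
  · rw [if_pos (hcond.2 hc)]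
    refine Prod.ext ?_ (Prod.ext ?_ ?_) <;> simp [nbN_succ, hc] <;> push_cast <;> ring
  · rw [if_neg (fun h => hc (hcond.1 h))]
    refine Prod.ext ?_ (Prod.ext ?_ ?_) <;> simp [nbN_succ, hc] <;> push_cast <;> ring

lemma A_fold : ∀ (L : List Int) (j : Nat) (t : Int),
    (L.foldl (fun st _ => stepA st) (256 + (j : Int), ((nbN j : Nat) : Int), t)).2.2
      = t + ∑ i ∈ Finset.range L.length, ((nbN (j + i) : Nat) : Int) := by
  intro L
  induction L with
  | nil => intro j t; simp
  | cons a L ih =>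
      intro j t
      simp only [List.foldl_cons, List.length_cons]
      rw [stepA_eq, ih (j + 1) (t + (nbN j : Int)), Finset.sum_range_succ']
      have hidx : ∀ i ∈ Finset.range L.length,
          ((nbN (j + (i + 1)) : Nat) : Int) = ((nbN (j + 1 + i) : Nat) : Int) := by
        intro i _
        rw [Nat.add_comm i 1, ← Nat.add_assoc]
      rw [Finset.sum_congr rfl hidx]
      simp
      ring

lemma fnB_stable (ν : Nat) (w : Int) (hw : (2 : Int) ^ w.toNat ≤ 255 + (ν : Int)) :
    fnB (ν + 1) w = fnB ν w := by
  unfold fnB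
  have h1 : min ((ν + 1 : Nat) : Int) (2 ^ w.toNat - 255) = 2 ^ w.toNat - 255 := by
    rw [min_eq_right]
    push_cast
    omega
  have h2 : min ((ν : Nat) : Int) (2 ^ w.toNat - 255) = 2 ^ w.toNat - 255 := by
    rw [min_eq_right]
    omega
  rw [h1, h2]

lemma fnB_bump (ν : Nat) (w : Int) (hw : (ν : Int) + 1 ≤ (2 : Int) ^ w.toNat - 255) :
    fnB (ν + 1) w = fnB ν w + w := by
  unfold fnB
  have h1 : min ((ν + 1 : Nat) : Int) (2 ^ w.toNat - 255) = ((ν + 1 : Nat) : Int) := by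
    rw [min_eq_left]
    push_cast
    omega
  have h2 : min ((ν : Nat) : Int) (2 ^ w.toNat - 255) = ((ν : Nat) : Int) := by
    rw [min_eq_left]
    omega
  rw [h1, h2]
  push_cast
  ring

-- B's partial sums over widths 8..W
def SB (ν W : Nat) : Int := ((PySem.List.pyRange 8 ((W : Int) + 1) 1).map (fnB ν)).sum

lemma SB_succW (ν W : Nat) (hW : 7 ≤ W) :
    SB ν (W + 1) = SB ν W + fnB ν ((W + 1 : Nat) : Int) := by
  unfold SB
  have e : ((W + 1 : Nat) : Int) + 1 = ((W : Int) + 1) + 1 := by push_cast; ring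
  have e2 : ((W + 1 : Nat) : Int) = (W : Int) + 1 := by push_cast; ring
  rw [e, e2, PySem.List.pyRange_one_succ_right (by push_cast; omega : (8 : Int) ≤ (W : Int) + 1)]
  rw [List.map_append, List.sum_append]
  simp

lemma SB_stable (ν W : Nat) (h : 2 ^ W ≤ 255 + ν) :
    SB (ν + 1) W = SB ν W := by
  unfold SB
  rw [List.map_congr_left]
  intro w hw
  rw [PySem.List.mem_pyRange_one] at hw
  apply fnB_stable
  have hwW : w.toNat ≤ W := by omega
  have hNat : (2 : Nat) ^ w.toNat ≤ 255 + ν :=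
    le_trans (Nat.pow_le_pow_right (by norm_num) hwW) h
  exact_mod_cast hNat

lemma log2_255 : Nat.log2 255 = 7 := by decide

lemma B_total_SB : ∀ (n : Nat), 1 ≤ n →
    SB n (pyBitLength (254 + n)) = ∑ i ∈ Finset.range n, ((nbN i : Nat) : Int) := by
  intro n hn
  induction n, hn using Nat.le_induction with
  | base =>
      have hbl : pyBitLength (254 + 1) = 8 := by norm_num [pyBitLength, log2_255]
      rw [hbl]
      unfold SB
      rw [PySem.List.pyRange_one_cons (by omega), PySem.List.pyRange_one_eq_nil (by omega)]
      simp [fnB, nbN, log2_255]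
  | succ n hn ih =>
      have hne : 254 + n ≠ 0 := by omega
      set l := Nat.log2 (254 + n) with hl
      have h1 : 2 ^ l ≤ 254 + n := Nat.log2_self_le hne
      have h2 : 254 + n < 2 ^ (l + 1) := Nat.lt_log2_self
      have hl7 : 7 ≤ l := (Nat.le_log2 hne).2 (by norm_num; omega)
      have hbl : pyBitLength (254 + n) = l + 1 := by simp [pyBitLength, hl]
      have hsucc : Nat.log2 (255 + n) = if 255 + n = 2 ^ (l + 1) then l + 1 else l := by
        have e : (254 + n) + 1 = 255 + n := by omega
        rw [show (255 + n) = (254 + n) + 1 from e.symm, log2_succ (254 + n) (by omega), e, hl]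
      have e1 : 254 + (n + 1) = 255 + n := by omega
      rw [hbl] at ih
      rw [e1]
      by_cases hpow : 255 + n = 2 ^ (l + 1)
      · have hlog : Nat.log2 (255 + n) = l + 1 := by rw [hsucc, if_pos hpow]
        have hW : pyBitLength (255 + n) = l + 2 := by
          simp [pyBitLength, hlog]
        rw [hW, show l + 2 = (l + 1) + 1 from by omega]
        rw [SB_succW (n + 1) (l + 1) (by omega)]
        rw [SB_stable n (l + 1) (by omega)]
        rw [ih, Finset.sum_range_succ]
        have hnbn : nbN n = (l + 1) + 1 := by unfold nbN; rw [hlog]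
        rw [hnbn]
        unfold fnB
        rw [Int.toNat_natCast]
        have hp1 : (2 : Int) ^ ((l + 1) + 1) = 2 * (255 + (n : Int)) := by
          have hNat : (2 : Nat) ^ ((l + 1) + 1) = 2 * (255 + n) := by
            rw [pow_succ, ← hpow]; ring
          exact_mod_cast hNat
        have hp2 : (2 : Int) ^ ((l + 1) + 1 - 1) = 255 + (n : Int) := by
          have e : (l + 1) + 1 - 1 = l + 1 := by omega
          rw [e]
          exact_mod_cast hpow.symm
        rw [hp1, hp2]
        rw [min_eq_left (by push_cast; omega), max_eq_right (by push_cast; omega)]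
        push_cast
        ring
      · have hlog : Nat.log2 (255 + n) = l := by rw [hsucc, if_neg hpow]
        have hW : pyBitLength (255 + n) = l + 1 := by
          simp [pyBitLength, hlog]
        rw [hW]
        rw [SB_succW (n + 1) l hl7]
        rw [SB_succW n l hl7] at ih
        rw [SB_stable n l (by omega)]
        rw [Finset.sum_range_succ, ← ih]
        have hnbn : ((nbN n : Nat) : Int) = ((l + 1 : Nat) : Int) := by
          unfold nbN; rw [hlog]
        rw [hnbn]
        have hge : 256 + n ≤ 2 ^ (l + 1) := by omega
        rw [fnB_bump n ((l + 1 : Nat) : Int) (by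
          rw [Int.toNat_natCast]
          have hc : ((256 + n : Nat) : Int) ≤ ((2 ^ (l + 1) : Nat) : Int) := by exact_mod_cast hge
          push_cast at hc ⊢
          omega)]
        ring

lemma B_total : ∀ (n : Nat), 1 ≤ n →
    ((PySem.List.pyRange 8 ((pyBitLength (254 + n) : Int) + 1) 1).map
        (fun w : Int => w * (min ((n : Nat) : Int) (2 ^ w.toNat - 255) - max 0 (2 ^ (w.toNat - 1) - 255)))).sum
      = ∑ i ∈ Finset.range n, ((nbN i : Nat) : Int) := by
  intro n hn
  exact B_total_SB n hn

lemma ceil8 (S : Int) : -(PySem.Int.floordiv (-S) 8) = PySem.Int.floordiv (S + 7) 8 := by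
  rw [PySem.Int.floordiv_eq_ediv_of_pos (by norm_num), PySem.Int.floordiv_eq_ediv_of_pos (by norm_num)]
  omega

theorem izracunaj_velikost_spec_aux : ∀ (KT : List Int),
    izracunaj_velikost KT = izracunaj_velikost_alt KT := by
  intro KT
  by_cases h0 : KT = []
  · subst h0; decide
  · have hlen : 1 ≤ KT.length := List.length_pos_iff.2 h0
    simp only [izracunaj_velikost, izracunaj_velikost_alt]
    rw [if_neg (by exact_mod_cast (by omega : KT.length ≠ 0) : ((KT.length : Int) ≠ 0))]
    have hnb0 : ((nbN 0 : Nat) : Int) = 8 := by norm_num [nbN, log2_255]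
    have hinit : ((256 : Int), (8 : Int), (0 : Int))
        = (256 + ((0 : Nat) : Int), ((nbN 0 : Nat) : Int), (0 : Int)) := by
      rw [hnb0]; norm_num
    rw [hinit, A_fold KT 0 0]
    rw [PySem.List.foldl_add]
    have hT : (254 + (KT.length : Int)).toNat = 254 + KT.length := by omega
    rw [hT, B_total KT.length hlen]
    simp only [zero_add]
    exact ceil8 _

-- ===== VERDICT (by name: the statement is the Claim_ definition above) =====
theorem izracunaj_velikost_spec : Claim_equal_izracunaj_velikost := by
  intro KT _
  exact izracunaj_velikost_spec_aux KT
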